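-- pv_equiv track=rewrite | github.com/binchoi/study | python/05-top-leet-questions/02-medium-collection/other/leetcode-contest-iii.py | minImpossibleOR
-- ===== SOURCE A (Python) =====
-- from typing import List
--
-- def minImpossibleOR(nums: List[int]) -> int:
--     curr = 1
--     while True:
--         sub_list = [n for n in nums if n | curr == curr]
--         cand = 0
--         for n in sub_list:
--             cand |= n
--         if curr != cand:
--             return curr
--         curr += 1
-- ===== SOURCE B (Python) =====
-- from typing import List
--
-- def minImpossibleOR(nums: List[int]) -> int:
--     present = set(nums)
--     p = 1
--     while p in present:
--         p *= 2
--     return p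
-- ===== Notes on version B (the rewrite author's own statement) =====
-- stated objective: simpler
-- what changed: B replaces A's per-candidate scan over nums (testing every curr = 1,2,3,... until the OR of its present submasks falls short) with one set of nums and a walk over powers of two, returning the first power of two absent from the set.
import Mathlib
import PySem

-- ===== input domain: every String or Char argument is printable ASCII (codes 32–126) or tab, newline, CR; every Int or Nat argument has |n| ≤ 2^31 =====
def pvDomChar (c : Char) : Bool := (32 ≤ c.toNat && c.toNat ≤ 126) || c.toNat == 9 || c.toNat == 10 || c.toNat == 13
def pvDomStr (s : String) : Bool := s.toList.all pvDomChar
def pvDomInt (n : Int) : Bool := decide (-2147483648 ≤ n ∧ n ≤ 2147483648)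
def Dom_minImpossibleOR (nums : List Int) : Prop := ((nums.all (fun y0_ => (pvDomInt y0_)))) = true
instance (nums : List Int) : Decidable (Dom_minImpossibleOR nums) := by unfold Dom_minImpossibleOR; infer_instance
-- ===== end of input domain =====

-- B replaces A's per-candidate scan over nums by one set of nums and a walk over powers of two
-- (the first power of two absent from nums is the answer): a shorter, different algorithm.

-- ===== PORT A =====
-- helpers for A's port: the nonnegative elements of nums as naturals, and their bitwise OR;
-- pvU + 1 is a fuel bound for A's 'while True' loop (proved sufficient below), a pure totality guard.
def pvNats (nums : List Int) : List Nat :=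
  nums.filterMap (fun n => if 0 ≤ n then some n.toNat else none)

def pvU (nums : List Int) : Nat := (pvNats nums).foldl (· ||| ·) 0

-- one iteration of A's loop body: sub_list and cand
def pvCandA (nums : List Int) (curr : Int) : Int :=
  (nums.filter (fun n => decide (PySem.Int.bor n curr = curr))).foldl
    (fun cand n => PySem.Int.bor cand n) 0

def pvLoopA (nums : List Int) : Nat → Int → Int
  | 0, curr => curr
  | f + 1, curr =>
    let cand := pvCandA nums curr
    if curr ≠ cand then curr else pvLoopA nums f (curr + 1)

def minImpossibleOR (nums : List Int) : Int :=
  pvLoopA nums (pvU nums + 1) 1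

-- ===== PORT B =====
def pvLoopB (present : PySem.Set Int) : Nat → Int → Int
  | 0, p => p
  | f + 1, p =>
    if PySem.Set.contains present p then pvLoopB present f (p * 2) else p

-- fuel nums.length + 1 is a totality guard (each successful test consumes a distinct member)
def minImpossibleOR_alt (nums : List Int) : Int :=
  pvLoopB (PySem.Set.ofList nums) (nums.length + 1) 1

-- ===== PRECONDITION & SPEC =====
def Spec_minImpossibleOR (nums : List Int) (out : Int) : Prop := out = minImpossibleOR_alt nums
instance (nums : List Int) (out : Int) : Decidable (Spec_minImpossibleOR nums out) := by unfold Spec_minImpossibleOR; infer_instance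

-- ===== CLAIM (what is proved, stated in full; the proofs are below) =====
def Claim_equal_minImpossibleOR : Prop := ∀ (nums : List Int), Dom_minImpossibleOR nums → Spec_minImpossibleOR nums (minImpossibleOR nums)

-- ===== LEMMAS AND PROOFS =====

lemma pv_mem_nats {nums : List Int} {m : Nat} :
    m ∈ pvNats nums ↔ (↑m : Int) ∈ nums := by
  unfold pvNats
  constructor
  · rintro h
    rcases List.mem_filterMap.1 h with ⟨n, hn, he⟩
    by_cases h0 : 0 ≤ n
    · simp [h0] at he
      have : n = (↑m : Int) := by omega
      exact this ▸ hn
    · simp [h0] at he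
  · intro h
    exact List.mem_filterMap.2 ⟨(↑m : Int), h, by simp⟩

lemma pv_bor_neg_left {n c : Int} (hn : n < 0) (hc : 0 ≤ c) : PySem.Int.bor n c < 0 := by
  simp only [PySem.Int.bor]
  split_ifs <;> omega

-- bit subset implies ≤
lemma pv_submask_le {a b : Nat} (h : ∀ i, a.testBit i = true → b.testBit i = true) : a ≤ b := by
  have hab : a ||| b = b := by
    apply Nat.eq_of_testBit_eq
    intro i
    simp only [Nat.testBit_or]
    cases ha : a.testBit i
    · simp
    · simp [h i ha]
  calc a ≤ a ||| b := Nat.left_le_or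
    _ = b := hab

lemma pv_testBit_foldl_or (l : List Nat) (acc i : Nat) :
    (l.foldl (· ||| ·) acc).testBit i = (acc.testBit i || l.any (fun a => a.testBit i)) := by
  induction l generalizing acc with
  | nil => simp
  | cons x t ih =>
    simp [List.foldl_cons, ih, Nat.testBit_or, Bool.or_assoc]

-- submasks of a power of two
lemma pv_submask_pow {m k : Nat} (h : m ||| 2 ^ k = 2 ^ k) : m = 0 ∨ m = 2 ^ k := by
  have hsub : ∀ i, m.testBit i = true → k = i := by
    intro i hi
    have hor : (m ||| 2 ^ k).testBit i = true := by simp [Nat.testBit_or, hi]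
    rw [h, Nat.testBit_two_pow] at hor
    exact of_decide_eq_true hor
  by_cases hk : m.testBit k = true
  · right
    apply Nat.eq_of_testBit_eq
    intro i
    rw [Nat.testBit_two_pow]
    by_cases hik : k = i
    · subst hik; simp [hk]
    · simp only [hik, decide_false]
      cases hmi : m.testBit i
      · rfl
      · exact absurd (hsub i hmi) hik
  · left
    apply Nat.eq_of_testBit_eq
    intro i
    rw [Nat.zero_testBit]
    cases hmi : m.testBit i
    · rfl
    · exact absurd ((hsub i hmi) ▸ hmi) (by simpa using hk)

-- A's filtered list, for a positive cast candidate, is the cast of the Nat-level filtered list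
lemma pv_filterA_eq (nums : List Int) (c : Nat) :
    nums.filter (fun n => decide (PySem.Int.bor n (↑c) = ↑c))
      = ((pvNats nums).filter (fun m => m ||| c == c)).map (fun m => (↑m : Int)) := by
  induction nums with
  | nil => rfl
  | cons n t ih =>
    by_cases h0 : 0 ≤ n
    · have hn : n = ((n.toNat : Nat) : Int) := by omega
      rw [show n = ((n.toNat : Nat) : Int) from hn]
      simp only [pvNats, List.filterMap_cons, List.filter_cons]
      simp only [if_pos (by omega : (0:Int) ≤ ((n.toNat : Nat) : Int))]
      rw [PySem.Int.bor_natCast]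
      by_cases hc : (n.toNat : Nat) ||| c = c
      · simp only [Int.toNat_natCast, List.filter_cons]
        simp [hc, ← pvNats.eq_def, ih]
      · have : ¬ ((((n.toNat ||| c : Nat)) : Int) = ↑c) := by
          exact_mod_cast hc
        simp only [Int.toNat_natCast, List.filter_cons]
        simp [hc, this, ← pvNats.eq_def, ih]
    · have hneg : PySem.Int.bor n ↑c < 0 := pv_bor_neg_left (by omega) (by positivity)
      have : ¬ (PySem.Int.bor n ↑c = ↑c) := by
        intro he; rw [he] at hneg; omega
      simp only [pvNats, List.filterMap_cons, List.filter_cons]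
      simp [this, h0, ← pvNats.eq_def, ih]

lemma pv_foldl_bor_cast (l : List Nat) (acc : Nat) :
    (l.map (fun m => (↑m : Int))).foldl (fun cand n => PySem.Int.bor cand n) ↑acc
      = ↑(l.foldl (· ||| ·) acc) := by
  induction l generalizing acc with
  | nil => rfl
  | cons x t ih =>
    show (t.map (fun m => (↑m : Int))).foldl (fun cand n => PySem.Int.bor cand n)
      (PySem.Int.bor ↑acc ↑x) = ↑((t.foldl (· ||| ·) (acc ||| x)))
    rw [PySem.Int.bor_natCast]
    exact ih (acc ||| x)

-- Nat-level value of A's cand at a positive cast candidate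
def pvCandN (nums : List Int) (c : Nat) : Nat :=
  ((pvNats nums).filter (fun m => m ||| c == c)).foldl (· ||| ·) 0

lemma pv_candA_eq (nums : List Int) (c : Nat) :
    pvCandA nums (↑c) = ↑(pvCandN nums c) := by
  unfold pvCandA pvCandN
  rw [pv_filterA_eq]
  exact_mod_cast pv_foldl_bor_cast _ 0

-- existence of a missing power of two
lemma pv_exK (nums : List Int) : ∃ k : Nat, ((2 ^ k : Nat) : Int) ∉ nums := by
  refine ⟨pvU nums + 1, fun hmem => ?_⟩
  have hm : (2 ^ (pvU nums + 1) : Nat) ∈ pvNats nums := pv_mem_nats.2 hmem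
  have hle : (2 ^ (pvU nums + 1) : Nat) ≤ pvU nums := by
    apply pv_submask_le
    intro i hi
    unfold pvU
    rw [pv_testBit_foldl_or]
    simp only [Nat.zero_testBit, Bool.false_or]
    exact List.any_eq_true.2 ⟨_, hm, hi⟩
  have : pvU nums < 2 ^ (pvU nums + 1) :=
    lt_of_lt_of_le Nat.lt_two_pow_self (Nat.pow_le_pow_right (by omega) (by omega))
  omega

def pvK (nums : List Int) : Nat := Nat.find (pv_exK nums)

lemma pv_K_not_mem (nums : List Int) : ((2 ^ pvK nums : Nat) : Int) ∉ nums :=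
  Nat.find_spec (pv_exK nums)

lemma pv_K_min {nums : List Int} {j : Nat} (h : j < pvK nums) : ((2 ^ j : Nat) : Int) ∈ nums := by
  have := Nat.find_min (pv_exK nums) h
  simpa using this

-- cand = curr for every curr below the missing power
lemma pv_candN_eq_self {nums : List Int} {c : Nat} (hlt : c < 2 ^ pvK nums) :
    pvCandN nums c = c := by
  apply Nat.eq_of_testBit_eq
  intro i
  unfold pvCandN
  rw [pv_testBit_foldl_or]
  simp only [Nat.zero_testBit, Bool.false_or]
  cases hci : c.testBit i
  · -- every filtered element is a submask of c, so bit i is absent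
    rw [Bool.eq_false_iff]
    intro hany
    rcases List.any_eq_true.1 hany with ⟨m, hmem, hmi⟩
    rcases List.mem_filter.1 hmem with ⟨_, hm⟩
    have hm' : m ||| c = c := by simpa using hm
    have hbit : (m ||| c).testBit i = true := by simp [Nat.testBit_or, hmi]
    rw [hm', hci] at hbit
    exact Bool.false_ne_true hbit
  · -- 2^i is in nums and passes the filter, contributing bit i
    have hiK : i < pvK nums := by
      by_contra hge
      have hc2 : c < 2 ^ i := lt_of_lt_of_le hlt (Nat.pow_le_pow_right (by omega) (by omega))
      rw [Nat.testBit_lt_two_pow hc2] at hci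
      exact Bool.false_ne_true hci
    have hmem : (2 ^ i : Nat) ∈ pvNats nums := pv_mem_nats.2 (pv_K_min hiK)
    have hfilt : (2 ^ i : Nat) ||| c = c := by
      apply Nat.eq_of_testBit_eq
      intro j
      rw [Nat.testBit_or, Nat.testBit_two_pow]
      by_cases hij : i = j
      · subst hij; simp [hci]
      · simp [hij]
    apply List.any_eq_true.2
    exact ⟨2 ^ i, List.mem_filter.2 ⟨hmem, by simpa using hfilt⟩, by simp⟩

lemma pv_candN_at_pow {nums : List Int} :
    pvCandN nums (2 ^ pvK nums) = 0 := by
  apply Nat.eq_of_testBit_eq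
  intro i
  unfold pvCandN
  rw [pv_testBit_foldl_or]
  simp only [Nat.zero_testBit, Bool.false_or]
  rw [Bool.eq_false_iff]
  intro hany
  rcases List.any_eq_true.1 hany with ⟨m, hmem, hmi⟩
  rcases List.mem_filter.1 hmem with ⟨hmn, hm⟩
  have hm' : m ||| 2 ^ pvK nums = 2 ^ pvK nums := by simpa using hm
  rcases pv_submask_pow hm' with rfl | rfl
  · rw [Nat.zero_testBit] at hmi
    exact Bool.false_ne_true hmi
  · exact pv_K_not_mem nums (pv_mem_nats.1 hmn)

lemma pv_loopA (nums : List Int) (f : Nat) : ∀ c : Nat, 0 < c → c ≤ 2 ^ pvK nums →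
    2 ^ pvK nums < c + f → pvLoopA nums f ↑c = ((2 ^ pvK nums : Nat) : Int) := by
  induction f with
  | zero => intro c _ h1 h2; omega
  | succ f ih =>
    intro c hc h1 h2
    rw [pvLoopA]
    simp only [pv_candA_eq]
    by_cases he : c = 2 ^ pvK nums
    · subst he
      rw [pv_candN_at_pow]
      simp only [Nat.cast_zero]
      rw [if_pos (by exact_mod_cast (by positivity : (0:Int) < ↑(2 ^ pvK nums : Nat)).ne')]
    · have hlt : c < 2 ^ pvK nums := lt_of_le_of_ne h1 he
      rw [pv_candN_eq_self hlt]
      rw [if_neg (by simp)]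
      have : (↑c + 1 : Int) = ((c + 1 : Nat) : Int) := by push_cast; ring
      rw [this]
      exact ih (c + 1) (by omega) (by omega) (by omega)

-- fuel sufficiency for A: 2^K ≤ pvU + 1
lemma pv_K_le_U (nums : List Int) : 2 ^ pvK nums ≤ pvU nums + 1 := by
  have h : 2 ^ pvK nums - 1 ≤ pvU nums := by
    apply pv_submask_le
    intro i hi
    rw [Nat.testBit_two_pow_sub_one] at hi
    have hiK : i < pvK nums := by simpa using hi
    have hm : (2 ^ i : Nat) ∈ pvNats nums := pv_mem_nats.2 (pv_K_min hiK)
    unfold pvU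
    rw [pv_testBit_foldl_or]
    simp only [Nat.zero_testBit, Bool.false_or]
    exact List.any_eq_true.2 ⟨_, hm, by simp⟩
  have : (0:Nat) < 2 ^ pvK nums := by positivity
  omega

-- B's loop returns the missing power
lemma pv_loopB (nums : List Int) (f : Nat) : ∀ j : Nat, j ≤ pvK nums → pvK nums < j + f →
    pvLoopB (PySem.Set.ofList nums) f ((2 ^ j : Nat) : Int) = ((2 ^ pvK nums : Nat) : Int) := by
  induction f with
  | zero => intro j h1 h2; omega
  | succ f ih =>
    intro j h1 h2
    rw [pvLoopB]
    by_cases hj : j = pvK nums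
    · subst hj
      rw [if_neg]
      intro hcon
      exact pv_K_not_mem nums ((PySem.Set.mem_ofList _ _).1 ((PySem.Set.contains_iff _ _).1 hcon))
    · have hjK : j < pvK nums := lt_of_le_of_ne h1 hj
      rw [if_pos ((PySem.Set.contains_iff _ _).2 ((PySem.Set.mem_ofList _ _).2 (pv_K_min hjK)))]
      have : ((2 ^ j : Nat) : Int) * 2 = ((2 ^ (j + 1) : Nat) : Int) := by
        push_cast; ring
      rw [this]
      exact ih (j + 1) (by omega) (by omega)

lemma pv_K_le_len (nums : List Int) : pvK nums ≤ nums.length := by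
  have hsub : ((List.range (pvK nums)).map (fun j => ((2 ^ j : Nat) : Int))) ⊆ nums := by
    intro x hx
    rcases List.mem_map.1 hx with ⟨j, hj, rfl⟩
    exact pv_K_min (List.mem_range.1 hj)
  have hnd : ((List.range (pvK nums)).map (fun j => ((2 ^ j : Nat) : Int))).Nodup := by
    apply List.Nodup.map _ (List.nodup_range)
    intro a b hab
    have hab' : ((2 ^ a : Nat) : Int) = ((2 ^ b : Nat) : Int) := hab
    exact Nat.pow_right_injective (a := 2) (by omega) (by exact_mod_cast hab')
  have := (List.subperm_of_subset hnd hsub).length_le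
  simpa using this

-- ===== VERDICT (by name: the statement is the Claim_ definition above) =====
theorem minImpossibleOR_spec : Claim_equal_minImpossibleOR := by
  intro nums _
  unfold Spec_minImpossibleOR minImpossibleOR minImpossibleOR_alt
  have hA : pvLoopA nums (pvU nums + 1) 1 = ((2 ^ pvK nums : Nat) : Int) := by
    have := pv_loopA nums (pvU nums + 1) 1 (by omega) Nat.one_le_two_pow
      (by have := pv_K_le_U nums; omega)
    simpa using this
  have hB : pvLoopB (PySem.Set.ofList nums) (nums.length + 1) 1 = ((2 ^ pvK nums : Nat) : Int) := by
    have := pv_loopB nums (nums.length + 1) 0 (by omega) (by have := pv_K_le_len nums; omega)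
    simpa using this
  rw [hA, hB]
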